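-- pv_equiv track=rewrite | github.com/Theomat/ProgSynth | examples/pbe/transduction/knowledge_graph/kg_path_finder.py | __make_query_path__
-- ===== SOURCE A (Python) =====
-- def __make_query_path__(distance: int, id: int, tabs: int = 1) -> str:
--     if distance == 0:
--         return ("\t" * tabs) + f"w:{{}} ?p{distance} ?o_{id}_{distance} ."
--     else:
--         path = __make_query_path__(distance - 1, id, tabs) + "\n"
--         path += (
--             "\t" * tabs
--         ) + f"?o_{id}_{distance-1} ?p{distance} ?o_{id}_{distance} ."
--         return path
-- ===== SOURCE B (Python) =====
-- def __make_query_path__(distance: int, id: int, tabs: int = 1) -> str: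
--     lines = [("\t" * tabs) + f"w:{{}} ?p0 ?o_{id}_0 ."]
--     for i in range(1, distance + 1):
--         lines.append(("\t" * tabs) + f"?o_{id}_{i-1} ?p{i} ?o_{id}_{i} .")
--     return "\n".join(lines)
-- ===== Notes on version B (the rewrite author's own statement) =====
-- stated objective: faster
-- what changed: Replaced the linear recursion (which rebuilds the growing string at every level, quadratic overall) with a single forward loop collecting the lines in a list joined once with newline.
import Mathlib
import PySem

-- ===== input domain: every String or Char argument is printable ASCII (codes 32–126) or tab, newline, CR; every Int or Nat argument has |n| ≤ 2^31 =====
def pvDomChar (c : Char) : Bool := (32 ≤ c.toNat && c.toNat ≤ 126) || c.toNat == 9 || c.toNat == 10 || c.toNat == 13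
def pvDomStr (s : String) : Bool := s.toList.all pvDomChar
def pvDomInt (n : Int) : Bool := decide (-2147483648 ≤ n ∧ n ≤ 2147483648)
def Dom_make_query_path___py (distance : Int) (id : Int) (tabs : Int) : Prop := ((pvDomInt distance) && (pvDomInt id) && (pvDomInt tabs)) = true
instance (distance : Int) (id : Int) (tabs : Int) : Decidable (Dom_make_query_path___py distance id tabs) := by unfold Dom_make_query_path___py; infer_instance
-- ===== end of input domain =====

-- B replaces A's recursion by one forward loop collecting the lines and a single join: simpler, same result.

-- ===== PORT A =====
-- "\t" * tabs (Python string repetition; empty for tabs ≤ 0)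
def pvTabs (tabs : Int) : String := String.ofList (PySem.List.pyRepeat ['\t'] tabs)

-- A recurses on distance - 1; fuel = distance.toNat makes this structural (A only
-- returns for distance ≥ 0; for negative distance Python raises RecursionError,
-- excluded by Pre_, and the fuel-0 branch is never reached there under Pre_).
def make_query_path___py_go : Nat → Int → Int → Int → String
  | fuel, distance, id, tabs =>
    if distance = 0 then
      pvTabs tabs ++ "w:{} ?p" ++ PySem.Int.toStr distance ++ " ?o_" ++ PySem.Int.toStr id
        ++ "_" ++ PySem.Int.toStr distance ++ " ."
    else
      match fuel with
      | 0 => ""  -- unreachable for distance ≥ 0 (Python: RecursionError for distance < 0)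
      | fuel' + 1 =>
        (make_query_path___py_go fuel' (distance - 1) id tabs ++ "\n")
          ++ (pvTabs tabs ++ "?o_" ++ PySem.Int.toStr id ++ "_" ++ PySem.Int.toStr (distance - 1)
              ++ " ?p" ++ PySem.Int.toStr distance ++ " ?o_" ++ PySem.Int.toStr id
              ++ "_" ++ PySem.Int.toStr distance ++ " .")

def make_query_path___py (distance : Int) (id : Int) (tabs : Int) : String :=
  make_query_path___py_go distance.toNat distance id tabs

-- ===== PORT B =====
-- one loop line:  ("\t"*tabs) + f"?o_{id}_{i-1} ?p{i} ?o_{id}_{i} ."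
def pvLine (id : Int) (tabs : Int) (i : Int) : String :=
  pvTabs tabs ++ "?o_" ++ PySem.Int.toStr id ++ "_" ++ PySem.Int.toStr (i - 1)
    ++ " ?p" ++ PySem.Int.toStr i ++ " ?o_" ++ PySem.Int.toStr id
    ++ "_" ++ PySem.Int.toStr i ++ " ."

def make_query_path___py_alt (distance : Int) (id : Int) (tabs : Int) : String :=
  let base := pvTabs tabs ++ "w:{} ?p0 ?o_" ++ PySem.Int.toStr id ++ "_0 ."
  let lines := base :: (PySem.List.pyRange 1 (distance + 1) 1).map (pvLine id tabs)
  PySem.Str.join "\n" lines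

-- ===== PRECONDITION & SPEC =====
-- Pre_ excludes distance < 0, where Python A recurses forever (RecursionError).
def Pre_make_query_path___py (distance : Int) (id : Int) (tabs : Int) : Prop := 0 ≤ distance
instance (distance : Int) (id : Int) (tabs : Int) : Decidable (Pre_make_query_path___py distance id tabs) := by unfold Pre_make_query_path___py; infer_instance
def pvWitness_make_query_path___py : Int × Int × Int := (3, 7, 2)

def Spec_make_query_path___py (distance : Int) (id : Int) (tabs : Int) (out : String) : Prop := out = make_query_path___py_alt distance id tabs
instance (distance : Int) (id : Int) (tabs : Int) (out : String) : Decidable (Spec_make_query_path___py distance id tabs out) := by unfold Spec_make_query_path___py; infer_instance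

-- ===== CLAIM (what is proved, stated in full; the proofs are below) =====
def Claim_equal_make_query_path___py : Prop := ∀ (distance : Int) (id : Int) (tabs : Int), Dom_make_query_path___py distance id tabs → Pre_make_query_path___py distance id tabs → Spec_make_query_path___py distance id tabs (make_query_path___py distance id tabs)


-- ===== LEMMAS AND PROOFS =====

theorem join_snoc (x y : String) (xs : List String) :
    PySem.Str.join "\n" ((y :: xs) ++ [x]) = PySem.Str.join "\n" (y :: xs) ++ "\n" ++ x := by
  induction xs generalizing y with
  | nil =>
    apply String.toList_injective
    simp [PySem.Str.join, PySem.Chars.join_cons_cons, PySem.Chars.join_singleton]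
  | cons z zs ih =>
    apply String.toList_injective
    have := congrArg String.toList (ih z)
    simp [PySem.Str.join, PySem.Chars.join_cons_cons] at this ⊢
    simp [this]

theorem go_eq_alt (n : Nat) (id tabs : Int) :
    make_query_path___py_go n (n : Int) id tabs = make_query_path___py_alt (n : Int) id tabs := by
  induction n with
  | zero =>
    apply String.toList_injective
    simp [make_query_path___py_go, make_query_path___py_alt, PySem.Str.join,
      PySem.List.pyRange_one_eq_nil, PySem.Chars.join_singleton, PySem.Int.toStr,
      show PySem.Int.toChars 0 = ['0'] from by decide]
  | succ n ih =>
    have hne : ((n : Int) + 1) ≠ 0 := by omega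
    have hsub : ((n : Int) + 1) - 1 = (n : Int) := by ring
    have hrange : PySem.List.pyRange 1 ((n : Int) + 1 + 1) 1
        = PySem.List.pyRange 1 ((n : Int) + 1) 1 ++ [(n : Int) + 1] :=
      PySem.List.pyRange_one_succ_right (by omega)
    show make_query_path___py_go (n + 1) ((n : Int) + 1) id tabs = _
    rw [make_query_path___py_go]
    rw [if_neg hne]
    unfold make_query_path___py_alt
    simp only [Nat.cast_add, Nat.cast_one]
    rw [hrange]
    simp only [List.map_append, List.map_cons, List.map_nil, ← List.cons_append]
    rw [join_snoc]
    rw [hsub, ih]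
    unfold make_query_path___py_alt pvLine
    simp [hsub, ← String.append_assoc]

theorem make_query_path___py_spec : Claim_equal_make_query_path___py := by
  intro distance id tabs _ hpre
  unfold Spec_make_query_path___py make_query_path___py
  have h : distance = (distance.toNat : Int) := by
    unfold Pre_make_query_path___py at hpre; omega
  rw [h]
  exact go_eq_alt distance.toNat id tabs
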